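-- pv_equiv track=rewrite | github.com/retroryan/real_estate_ai_search | common_embeddings/correlation/enrichment_engine.py | _categorize_amenities
-- ===== SOURCE A (Python) =====
-- from typing import Dict, Any, List, Optional, Set, Union, Callable
--
-- def _categorize_amenities(amenities: List[str]) -> Dict[str, List[str]]:
--     """Categorize amenities into different types."""
--     categories = {
--         'transportation': [],
--         'recreation': [],
--         'shopping': [],
--         'education': [],
--         'healthcare': [],
--         'other': []
--     }
--
--     # Simple keyword-based categorization
--     category_keywords = {
--         'transportation': ['transit', 'bus', 'train', 'subway', 'metro'],
--         'recreation': ['park', 'gym', 'sports', 'pool', 'recreation'],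
--         'shopping': ['mall', 'store', 'shopping', 'market', 'grocery'],
--         'education': ['school', 'university', 'college', 'library'],
--         'healthcare': ['hospital', 'clinic', 'medical', 'health']
--     }
--
--     for amenity in amenities:
--         amenity_lower = amenity.lower()
--         categorized = False
--
--         for category, keywords in category_keywords.items():
--             if any(keyword in amenity_lower for keyword in keywords):
--                 categories[category].append(amenity)
--                 categorized = True
--                 break
--
--         if not categorized:
--             categories['other'].append(amenity)
--
--     return categories
-- ===== SOURCE B (Python) =====
-- def _categorize_amenities(amenities):
--     """Categorize amenities category-major: scan the list once per category,
--     claiming not-yet-assigned amenities by index; leftovers go to 'other'."""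
--     category_keywords = {
--         'transportation': ['transit', 'bus', 'train', 'subway', 'metro'],
--         'recreation': ['park', 'gym', 'sports', 'pool', 'recreation'],
--         'shopping': ['mall', 'store', 'shopping', 'market', 'grocery'],
--         'education': ['school', 'university', 'college', 'library'],
--         'healthcare': ['hospital', 'clinic', 'medical', 'health'],
--     }
--     assigned = set()
--     result = {}
--     for category, keywords in category_keywords.items():
--         bucket = []
--         for i, amenity in enumerate(amenities):
--             if i not in assigned and any(kw in amenity.lower() for kw in keywords):
--                 assigned.add(i)
--                 bucket.append(amenity)
--         result[category] = bucket
--     result['other'] = [a for i, a in enumerate(amenities) if i not in assigned]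
--     return result
-- ===== Notes on version B (the rewrite author's own statement) =====
-- stated objective: alternative
-- what changed: Flips A's amenity-major single pass (each amenity breaks on its first matching category) into a category-major traversal: one scan of the amenity list per category that claims still-unassigned amenities by index via an `assigned` set, with the leftover indices collected into 'other' at the end.
import Mathlib
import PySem

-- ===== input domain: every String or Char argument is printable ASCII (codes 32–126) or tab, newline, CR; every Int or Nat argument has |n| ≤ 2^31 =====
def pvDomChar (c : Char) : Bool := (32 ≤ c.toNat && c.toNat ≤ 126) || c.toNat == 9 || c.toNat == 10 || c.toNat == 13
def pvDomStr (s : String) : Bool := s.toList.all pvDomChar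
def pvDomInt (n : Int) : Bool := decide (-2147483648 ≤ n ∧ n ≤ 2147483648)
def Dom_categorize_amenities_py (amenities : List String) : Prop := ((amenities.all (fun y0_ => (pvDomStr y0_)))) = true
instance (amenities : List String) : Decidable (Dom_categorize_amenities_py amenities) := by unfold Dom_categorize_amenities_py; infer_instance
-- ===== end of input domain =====

-- B replaces A's amenity-major first-match-wins pass with a category-major traversal:
-- one scan of the list per category claiming unassigned amenities by index (alternative
-- decomposition, same results). A proof-side classify function ties the two together.


-- ===== PORT A =====
-- the body of A's `for amenity in amenities` loop; the inner `for category, keywords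
-- in category_keywords.items()` loop with `break` over the literal dict is transliterated
-- as the ordered if/else-if chain over its five (category, keywords) items
def pvAStep (d : PySem.Dict String (List String)) (amenity : String) :
    PySem.Dict String (List String) :=
  let amenity_lower := PySem.Str.lower amenity
  if ["transit", "bus", "train", "subway", "metro"].any
      (fun keyword => PySem.Str.isIn keyword amenity_lower) then
    d.modify "transportation" [] (· ++ [amenity])
  else if ["park", "gym", "sports", "pool", "recreation"].any
      (fun keyword => PySem.Str.isIn keyword amenity_lower) then
    d.modify "recreation" [] (· ++ [amenity])
  else if ["mall", "store", "shopping", "market", "grocery"].any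
      (fun keyword => PySem.Str.isIn keyword amenity_lower) then
    d.modify "shopping" [] (· ++ [amenity])
  else if ["school", "university", "college", "library"].any
      (fun keyword => PySem.Str.isIn keyword amenity_lower) then
    d.modify "education" [] (· ++ [amenity])
  else if ["hospital", "clinic", "medical", "health"].any
      (fun keyword => PySem.Str.isIn keyword amenity_lower) then
    d.modify "healthcare" [] (· ++ [amenity])
  else
    d.modify "other" [] (· ++ [amenity])

def categorize_amenities_py (amenities : List String) : List (String × List String) :=
  let categories : PySem.Dict String (List String) :=
    (((((PySem.Dict.empty.insert "transportation" []).insert "recreation" []).insert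
        "shopping" []).insert "education" []).insert "healthcare" []).insert "other" []
  (amenities.foldl pvAStep categories).items

-- ===== PORT B =====
-- Source B's category_keywords dict, as its ordered item list
def pvCatKeywords : List (String × List String) :=
  [("transportation", ["transit", "bus", "train", "subway", "metro"]),
   ("recreation", ["park", "gym", "sports", "pool", "recreation"]),
   ("shopping", ["mall", "store", "shopping", "market", "grocery"]),
   ("education", ["school", "university", "college", "library"]),
   ("healthcare", ["hospital", "clinic", "medical", "health"])]

-- the body of Source B's inner `for i, amenity in enumerate(amenities)` loop:
-- claim an unassigned matching amenity (add its index, append it to the bucket)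
def pvBStep (keywords : List String) (st : PySem.Set Int × List String)
    (p : Int × String) : PySem.Set Int × List String :=
  if !(PySem.Set.contains st.1 p.1) &&
      keywords.any (fun kw => PySem.Str.isIn kw (PySem.Str.lower p.2)) then
    (PySem.Set.add st.1 p.1, st.2 ++ [p.2])
  else st

def categorize_amenities_py_alt (amenities : List String) : List (String × List String) :=
  let enum := PySem.List.enumerate amenities
  -- outer `for category, keywords in category_keywords.items()` loop, carrying
  -- (assigned, result-items) through the per-category scans
  let st := pvCatKeywords.foldl
    (fun (st : PySem.Set Int × List (String × List String)) ckw =>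
      let inner := enum.foldl (pvBStep ckw.2) (st.1, [])
      (inner.1, st.2 ++ [(ckw.1, inner.2)]))
    (PySem.Set.empty, [])
  st.2 ++ [("other",
    (enum.filter (fun p => !(PySem.Set.contains st.1 p.1))).map (fun p => p.2))]

-- ===== PRECONDITION & SPEC =====
def Spec_categorize_amenities_py (amenities : List String) (out : List (String × List String)) : Prop := out = categorize_amenities_py_alt amenities
instance (amenities : List String) (out : List (String × List String)) : Decidable (Spec_categorize_amenities_py amenities out) := by unfold Spec_categorize_amenities_py; infer_instance

-- ===== CLAIM (what is proved, stated in full; the proofs are below) =====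
def Claim_equal_categorize_amenities_py : Prop := ∀ (amenities : List String), Dom_categorize_amenities_py amenities → Spec_categorize_amenities_py amenities (categorize_amenities_py amenities)

-- ===== LEMMAS AND PROOFS =====

-- proof-side helpers: keyword match and first-match classification
def pvMatch (keywords : List String) (a : String) : Bool :=
  keywords.any (fun kw => PySem.Str.isIn kw (PySem.Str.lower a))

def pvClassify (a : String) : String :=
  if pvMatch ["transit", "bus", "train", "subway", "metro"] a then "transportation"
  else if pvMatch ["park", "gym", "sports", "pool", "recreation"] a then "recreation"
  else if pvMatch ["mall", "store", "shopping", "market", "grocery"] a then "shopping"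
  else if pvMatch ["school", "university", "college", "library"] a then "education"
  else if pvMatch ["hospital", "clinic", "medical", "health"] a then "healthcare"
  else "other"

-- A's loop body appends the amenity to exactly the category classify picks
lemma pvAStep_eq_modify_classify (d : PySem.Dict String (List String)) (a : String) :
    pvAStep d a = d.modify (pvClassify a) [] (· ++ [a]) := by
  simp only [pvAStep, pvClassify, pvMatch]
  split_ifs <;> rfl

-- classify only ever returns one of the six category names
lemma pvClassify_mem (a : String) :
    pvClassify a = "transportation" ∨ pvClassify a = "recreation" ∨
    pvClassify a = "shopping" ∨ pvClassify a = "education" ∨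
    pvClassify a = "healthcare" ∨ pvClassify a = "other" := by
  unfold pvClassify
  split_ifs <;> simp

-- A's loop invariant: folding A's step appends, per category, the amenities classify picks
lemma pvLoop (xs : List String) (l1 l2 l3 l4 l5 l6 : List String) :
    xs.foldl pvAStep (PySem.Dict.mk
      [("transportation", l1), ("recreation", l2), ("shopping", l3),
       ("education", l4), ("healthcare", l5), ("other", l6)]) =
    PySem.Dict.mk
      [("transportation", l1 ++ xs.filter (fun a => pvClassify a == "transportation")),
       ("recreation", l2 ++ xs.filter (fun a => pvClassify a == "recreation")),
       ("shopping", l3 ++ xs.filter (fun a => pvClassify a == "shopping")),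
       ("education", l4 ++ xs.filter (fun a => pvClassify a == "education")),
       ("healthcare", l5 ++ xs.filter (fun a => pvClassify a == "healthcare")),
       ("other", l6 ++ xs.filter (fun a => pvClassify a == "other"))] := by
  induction xs generalizing l1 l2 l3 l4 l5 l6 with
  | nil => simp
  | cons x xs ih =>
    rw [List.foldl_cons, pvAStep_eq_modify_classify]
    rcases pvClassify_mem x with h | h | h | h | h | h <;>
      simp [h, PySem.Dict.modify, PySem.Dict.insert, PySem.Dict.contains,
            PySem.Dict.getD, PySem.Dict.get?, ih]

-- membership in a set after add
lemma pvContains_add (s : PySem.Set Int) (x y : Int) :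
    (PySem.Set.add s x).contains y = (s.contains y || x == y) := by
  simp only [PySem.Set.contains, PySem.Set.add, List.contains_eq_mem]
  split_ifs with h
  · by_cases hxy : x = y
    · subst hxy; simp [h]
    · simp [beq_iff_eq, hxy]
  · by_cases hxy : x = y
    · subst hxy; simp [List.mem_append]
    · simp [List.mem_append, beq_iff_eq, hxy, Ne.symm hxy]

-- B's inner scan, characterised: given that membership in `S` coincides with a
-- predicate `Q` of the amenity (for pairs with pairwise-distinct indices), the scan
-- collects exactly the Q-unclaimed matches, in order, and marks exactly their indices
lemma pvInner_spec (kws : List String) (Q : String → Bool)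
    (xs : List (Int × String)) (S : PySem.Set Int) (acc : List String)
    (hpw : xs.Pairwise (fun p q => p.1 ≠ q.1))
    (hmem : ∀ p ∈ xs, S.contains p.1 = Q p.2) :
    (xs.foldl (pvBStep kws) (S, acc)).2
        = acc ++ (xs.filter (fun p => !(Q p.2) && pvMatch kws p.2)).map (fun p => p.2)
    ∧ ∀ j, (xs.foldl (pvBStep kws) (S, acc)).1.contains j
        = (S.contains j || xs.any (fun p => p.1 == j && (!(Q p.2) && pvMatch kws p.2))) := by
  induction xs generalizing S acc with
  | nil => simp
  | cons p xs ih =>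
    have hp : S.contains p.1 = Q p.2 := hmem p (List.mem_cons_self ..)
    have hpwtail := List.Pairwise.of_cons hpw
    have hhead : ∀ q ∈ xs, p.1 ≠ q.1 := fun q hq => List.rel_of_pairwise_cons hpw hq
    have hstep : pvBStep kws (S, acc) p =
        if (!(Q p.2) && pvMatch kws p.2) then (PySem.Set.add S p.1, acc ++ [p.2])
        else (S, acc) := by
      simp only [pvBStep, pvMatch, hp]
      rfl
    rw [List.foldl_cons, hstep]
    by_cases hc : (!(Q p.2) && pvMatch kws p.2) = true
    · rw [if_pos hc]
      have hmem' : ∀ q ∈ xs, (PySem.Set.add S p.1).contains q.1 = Q q.2 := by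
        intro q hq
        rw [pvContains_add]
        have hne : (p.1 == q.1) = false := by simp [hhead q hq]
        rw [hmem q (List.mem_cons_of_mem _ hq), hne, Bool.or_false]
      obtain ⟨h2, h1⟩ := ih (PySem.Set.add S p.1) (acc ++ [p.2]) hpwtail hmem'
      refine ⟨?_, ?_⟩
      · rw [h2]
        simp [hc]
      · intro j
        rw [h1 j, pvContains_add]
        simp only [List.any_cons, hc, Bool.and_true]
        cases hj : (p.1 == j) <;> cases S.contains j <;> simp
    · rw [if_neg hc]
      have hcb : (!(Q p.2) && pvMatch kws p.2) = false := Bool.eq_false_iff.mpr hc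
      have hmem' : ∀ q ∈ xs, S.contains q.1 = Q q.2 :=
        fun q hq => hmem q (List.mem_cons_of_mem _ hq)
      obtain ⟨h2, h1⟩ := ih S acc hpwtail hmem'
      refine ⟨?_, ?_⟩
      · rw [h2]
        simp [hcb]
      · intro j
        rw [h1 j]
        simp [hcb]

-- with pairwise-distinct indices, the `any` over index-matching pairs evaluates at p
lemma pvAny_fst (xs : List (Int × String)) (p : Int × String) (X : String → Bool)
    (hpw : xs.Pairwise (fun p q => p.1 ≠ q.1)) (hp : p ∈ xs) :
    xs.any (fun q => q.1 == p.1 && X q.2) = X p.2 := by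
  induction xs with
  | nil => cases hp
  | cons h t ih =>
    have hhead : ∀ q ∈ t, h.1 ≠ q.1 := fun q hq => List.rel_of_pairwise_cons hpw hq
    rcases List.mem_cons.mp hp with rfl | hpt
    · have ht : t.any (fun q => q.1 == p.1 && X q.2) = false := by
        rw [List.any_eq_false]
        intro q hq
        simp [(hhead q hq).symm]
      simp [ht]
    · have : (h.1 == p.1) = false := by simp [hhead p hpt]
      simp [this, ih (List.Pairwise.of_cons hpw) hpt]

-- filtering enumerate by a property of the amenity, then dropping indices, is filter
lemma pvFilterEnum (xs : List String) (f : String → Bool) (s : Int) :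
    ((PySem.List.enumerate xs s).filter (fun p => f p.2)).map (fun p => p.2)
      = xs.filter f := by
  induction xs generalizing s with
  | nil => simp
  | cons x xs ih =>
    rw [PySem.List.enumerate_cons, List.filter_cons]
    by_cases h : f x <;> simp [h, ih]


-- one category-major stage: starting from a set whose membership over the enumerated
-- pairs is Q, the scan's bucket is the Q-unclaimed matches and the new set's
-- membership is Q-or-match
lemma pvStage (amenities : List String) (kws : List String) (Q : String → Bool)
    (S : PySem.Set Int)
    (hmem : ∀ p ∈ PySem.List.enumerate amenities, S.contains p.1 = Q p.2) :
    ((PySem.List.enumerate amenities).foldl (pvBStep kws) (S, [])).2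
        = amenities.filter (fun a => !(Q a) && pvMatch kws a)
    ∧ ∀ p ∈ PySem.List.enumerate amenities,
        ((PySem.List.enumerate amenities).foldl (pvBStep kws) (S, [])).1.contains p.1
          = (Q p.2 || pvMatch kws p.2) := by
  have hpw : (PySem.List.enumerate amenities).Pairwise (fun p q => p.1 ≠ q.1) :=
    (PySem.List.pairwise_lt_enumerate amenities 0).imp (fun h => ne_of_lt h)
  obtain ⟨hb, hs⟩ := pvInner_spec kws Q (PySem.List.enumerate amenities) S [] hpw hmem
  constructor
  · rw [hb, List.nil_append]
    exact pvFilterEnum amenities (fun a => !(Q a) && pvMatch kws a) 0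
  · intro p hp
    rw [hs p.1,
      pvAny_fst (PySem.List.enumerate amenities) p (fun a => !(Q a) && pvMatch kws a) hpw hp,
      hmem p hp]
    cases Q p.2 <;> cases pvMatch kws p.2 <;> rfl

-- classify, re-expressed per category as match-and-not-earlier-match
lemma pvC1 (a : String) : (pvClassify a == "transportation")
    = (!(false : Bool) && pvMatch ["transit", "bus", "train", "subway", "metro"] a) := by
  unfold pvClassify; split_ifs <;> simp_all
lemma pvC2 (a : String) : (pvClassify a == "recreation")
    = (!(pvMatch ["transit", "bus", "train", "subway", "metro"] a)
       && pvMatch ["park", "gym", "sports", "pool", "recreation"] a) := by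
  unfold pvClassify; split_ifs <;> simp_all
lemma pvC3 (a : String) : (pvClassify a == "shopping")
    = (!(pvMatch ["transit", "bus", "train", "subway", "metro"] a
         || pvMatch ["park", "gym", "sports", "pool", "recreation"] a)
       && pvMatch ["mall", "store", "shopping", "market", "grocery"] a) := by
  unfold pvClassify; split_ifs <;> simp_all
lemma pvC4 (a : String) : (pvClassify a == "education")
    = (!(pvMatch ["transit", "bus", "train", "subway", "metro"] a
         || pvMatch ["park", "gym", "sports", "pool", "recreation"] a
         || pvMatch ["mall", "store", "shopping", "market", "grocery"] a)
       && pvMatch ["school", "university", "college", "library"] a) := by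
  unfold pvClassify; split_ifs <;> simp_all
lemma pvC5 (a : String) : (pvClassify a == "healthcare")
    = (!(pvMatch ["transit", "bus", "train", "subway", "metro"] a
         || pvMatch ["park", "gym", "sports", "pool", "recreation"] a
         || pvMatch ["mall", "store", "shopping", "market", "grocery"] a
         || pvMatch ["school", "university", "college", "library"] a)
       && pvMatch ["hospital", "clinic", "medical", "health"] a) := by
  unfold pvClassify; split_ifs <;> simp_all
lemma pvC6 (a : String) : (pvClassify a == "other")
    = (!(pvMatch ["transit", "bus", "train", "subway", "metro"] a
         || pvMatch ["park", "gym", "sports", "pool", "recreation"] a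
         || pvMatch ["mall", "store", "shopping", "market", "grocery"] a
         || pvMatch ["school", "university", "college", "library"] a
         || pvMatch ["hospital", "clinic", "medical", "health"] a)) := by
  unfold pvClassify; split_ifs <;> simp_all

-- ===== VERDICT (by name: the statement is the Claim_ definition above) =====
theorem categorize_amenities_py_spec : Claim_equal_categorize_amenities_py := by
  intro amenities _
  unfold Spec_categorize_amenities_py
  -- A's side: the loop invariant collapses A to the classify-filter table
  have hA : categorize_amenities_py amenities =
      [("transportation", amenities.filter (fun a => pvClassify a == "transportation")),
       ("recreation", amenities.filter (fun a => pvClassify a == "recreation")),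
       ("shopping", amenities.filter (fun a => pvClassify a == "shopping")),
       ("education", amenities.filter (fun a => pvClassify a == "education")),
       ("healthcare", amenities.filter (fun a => pvClassify a == "healthcare")),
       ("other", amenities.filter (fun a => pvClassify a == "other"))] := by
    unfold categorize_amenities_py
    have h0 : ((((((PySem.Dict.empty.insert "transportation" ([] : List String)).insert
        "recreation" []).insert "shopping" []).insert "education" []).insert
        "healthcare" []).insert "other" []) = PySem.Dict.mk
        [("transportation", []), ("recreation", []), ("shopping", []),
         ("education", []), ("healthcare", []), ("other", [])] := by rfl
    simp only [h0, pvLoop, List.nil_append]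

  -- B's side: five applications of the stage lemma, then the leftover 'other' scan
  have hmem0 : ∀ p ∈ PySem.List.enumerate amenities,
      (PySem.Set.empty : PySem.Set Int).contains p.1 = (fun _ : String => false) p.2 :=
    fun p _ => rfl
  obtain ⟨hb1, hm1⟩ := pvStage amenities ["transit", "bus", "train", "subway", "metro"]
    (fun _ => false) PySem.Set.empty hmem0
  obtain ⟨hb2, hm2⟩ := pvStage amenities ["park", "gym", "sports", "pool", "recreation"]
    (fun a => false || pvMatch ["transit", "bus", "train", "subway", "metro"] a) _ hm1
  obtain ⟨hb3, hm3⟩ := pvStage amenities ["mall", "store", "shopping", "market", "grocery"]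
    (fun a => (false || pvMatch ["transit", "bus", "train", "subway", "metro"] a)
      || pvMatch ["park", "gym", "sports", "pool", "recreation"] a) _ hm2
  obtain ⟨hb4, hm4⟩ := pvStage amenities ["school", "university", "college", "library"]
    (fun a => ((false || pvMatch ["transit", "bus", "train", "subway", "metro"] a)
      || pvMatch ["park", "gym", "sports", "pool", "recreation"] a)
      || pvMatch ["mall", "store", "shopping", "market", "grocery"] a) _ hm3
  obtain ⟨hb5, hm5⟩ := pvStage amenities ["hospital", "clinic", "medical", "health"]
    (fun a => (((false || pvMatch ["transit", "bus", "train", "subway", "metro"] a)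
      || pvMatch ["park", "gym", "sports", "pool", "recreation"] a)
      || pvMatch ["mall", "store", "shopping", "market", "grocery"] a)
      || pvMatch ["school", "university", "college", "library"] a) _ hm4
  have hother : ((PySem.List.enumerate amenities).filter
      (fun p => !(((PySem.List.enumerate amenities).foldl
        (pvBStep ["hospital", "clinic", "medical", "health"])
        (((PySem.List.enumerate amenities).foldl
          (pvBStep ["school", "university", "college", "library"])
          (((PySem.List.enumerate amenities).foldl
            (pvBStep ["mall", "store", "shopping", "market", "grocery"])
            (((PySem.List.enumerate amenities).foldl
              (pvBStep ["park", "gym", "sports", "pool", "recreation"])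
              (((PySem.List.enumerate amenities).foldl
                (pvBStep ["transit", "bus", "train", "subway", "metro"])
                (PySem.Set.empty, [])).1, [])).1, [])).1, [])).1, [])).1.contains p.1))).map
        (fun p => p.2)
      = amenities.filter (fun a =>
        !((((false || pvMatch ["transit", "bus", "train", "subway", "metro"] a)
          || pvMatch ["park", "gym", "sports", "pool", "recreation"] a)
          || pvMatch ["mall", "store", "shopping", "market", "grocery"] a)
          || pvMatch ["school", "university", "college", "library"] a
          || pvMatch ["hospital", "clinic", "medical", "health"] a)) := by
    rw [List.filter_congr (fun p hp => by rw [hm5 p hp])]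
    exact pvFilterEnum amenities (fun a =>
      !((((false || pvMatch ["transit", "bus", "train", "subway", "metro"] a)
        || pvMatch ["park", "gym", "sports", "pool", "recreation"] a)
        || pvMatch ["mall", "store", "shopping", "market", "grocery"] a)
        || pvMatch ["school", "university", "college", "library"] a
        || pvMatch ["hospital", "clinic", "medical", "health"] a)) 0
  rw [hA]
  unfold categorize_amenities_py_alt pvCatKeywords
  simp only [List.foldl_cons, List.foldl_nil]
  rw [hb1, hb2, hb3, hb4, hb5, hother,
    List.filter_congr (fun a _ => pvC1 a), List.filter_congr (fun a _ => pvC2 a),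
    List.filter_congr (fun a _ => pvC3 a), List.filter_congr (fun a _ => pvC4 a),
    List.filter_congr (fun a _ => pvC5 a), List.filter_congr (fun a _ => pvC6 a)]
  simp
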